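-- pv_equiv track=rewrite | github.com/danieleschmidt/lexgraph-legal-rag | src/lexgraph_legal_rag/scalable_index.py | _distribute_queries
-- ===== SOURCE A (Python) =====
-- from typing import Dict, List, Optional, Any, Tuple
--
-- def _distribute_queries(
--
--     indexed_queries: List[Tuple[int, str]],
--     num_instances: int
-- ) -> List[List[Tuple[int, str]]]:
--     """Distribute queries evenly across instances."""
--     batches = [[] for _ in range(num_instances)]
--
--     for i, query_item in enumerate(indexed_queries):
--         batch_index = i % num_instances
--         batches[batch_index].append(query_item)
--
--     return batches
-- ===== SOURCE B (Python) =====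
-- from typing import Dict, List, Optional, Any, Tuple
--
-- def _distribute_queries(
--
--     indexed_queries: List[Tuple[int, str]],
--     num_instances: int
-- ) -> List[List[Tuple[int, str]]]:
--     """Distribute queries evenly across instances."""
--     return [indexed_queries[j::num_instances] for j in range(num_instances)]
-- ===== Notes on version B (the rewrite author's own statement) =====
-- stated objective: simpler
-- what changed: Replaces the build-empty-batches-then-single-pass-modulo-append loop by one strided slice indexed_queries[j::num_instances] per instance, constructing each round-robin batch directly.
-- outside the precondition, e.g. on _distribute_queries([(0, 'q')], 0): A raises ZeroDivisionError, B returns []; on _distribute_queries([(0, 'q')], -1): A raises IndexError, B returns []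
import Mathlib
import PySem

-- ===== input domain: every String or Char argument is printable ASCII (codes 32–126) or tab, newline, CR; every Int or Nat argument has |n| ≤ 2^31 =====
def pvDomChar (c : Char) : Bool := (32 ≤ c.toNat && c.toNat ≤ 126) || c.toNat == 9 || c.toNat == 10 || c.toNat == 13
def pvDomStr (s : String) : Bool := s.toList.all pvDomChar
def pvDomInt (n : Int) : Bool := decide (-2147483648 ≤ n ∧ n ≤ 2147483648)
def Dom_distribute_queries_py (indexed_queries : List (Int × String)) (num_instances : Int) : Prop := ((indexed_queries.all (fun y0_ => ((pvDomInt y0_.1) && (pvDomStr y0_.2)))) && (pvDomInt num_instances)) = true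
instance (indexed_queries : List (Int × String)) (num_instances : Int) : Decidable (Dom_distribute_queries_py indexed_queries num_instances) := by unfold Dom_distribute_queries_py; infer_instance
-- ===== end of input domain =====

-- B replaces A's single-pass modulo-append loop by one strided slice per instance; equal return values on Pre_ (A mutates nothing it was given).

-- ===== PORT A =====
-- batches = [[] for _ in range(num_instances)]; for i, q in enumerate(...): batches[i % num_instances].append(q)
-- `.toNat` and `List.modify` are exact under Pre_ (there 0 ≤ i % num_instances < num_instances = batches.length);
-- the inputs where Python raises (num_instances ≤ 0 with a nonempty list) are excluded by Pre_.
def distribute_queries_py (indexed_queries : List (Int × String)) (num_instances : Int) : List (List (Int × String)) :=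
  let batches : List (List (Int × String)) := (PySem.List.pyRange 0 num_instances 1).map (fun _ => [])
  (PySem.List.enumerate indexed_queries).foldl
    (fun b p => b.modify (PySem.Int.mod p.1 num_instances).toNat (fun batch => batch ++ [p.2])) batches

-- ===== PORT B =====
-- [indexed_queries[j::num_instances] for j in range(num_instances)]
-- `.getD []` only totalizes slice?'s step = 0 case, which is unreachable: j ∈ range(num_instances) forces num_instances ≥ 1.
def distribute_queries_py_alt (indexed_queries : List (Int × String)) (num_instances : Int) : List (List (Int × String)) :=
  (PySem.List.pyRange 0 num_instances 1).map
    (fun j => (PySem.List.slice? indexed_queries (some j) none num_instances).getD [])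

-- ===== PRECONDITION & SPEC =====
-- Pre_ excludes exactly the inputs where A raises: num_instances ≤ 0 with a nonempty query list
-- (ZeroDivisionError for num_instances = 0, IndexError for negative num_instances).
def Pre_distribute_queries_py (indexed_queries : List (Int × String)) (num_instances : Int) : Prop :=
  0 < num_instances ∨ indexed_queries = []
instance (indexed_queries : List (Int × String)) (num_instances : Int) : Decidable (Pre_distribute_queries_py indexed_queries num_instances) := by unfold Pre_distribute_queries_py; infer_instance

def pvWitness_distribute_queries_py : (List (Int × String)) × Int := ([(1, "a"), (2, "b"), (3, "c")], 2)

def Spec_distribute_queries_py (indexed_queries : List (Int × String)) (num_instances : Int) (out : List (List (Int × String))) : Prop := out = distribute_queries_py_alt indexed_queries num_instances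
instance (indexed_queries : List (Int × String)) (num_instances : Int) (out : List (List (Int × String))) : Decidable (Spec_distribute_queries_py indexed_queries num_instances out) := by unfold Spec_distribute_queries_py; infer_instance

-- ===== CLAIM (what is proved, stated in full; the proofs are below) =====
def Claim_equal_distribute_queries_py : Prop := ∀ (indexed_queries : List (Int × String)) (num_instances : Int), Dom_distribute_queries_py indexed_queries num_instances → Pre_distribute_queries_py indexed_queries num_instances → Spec_distribute_queries_py indexed_queries num_instances (distribute_queries_py indexed_queries num_instances)

-- ===== LEMMAS AND PROOFS =====

-- pvSel xs s nn j : the elements of xs whose (s + position) ≡ j (mod nn) — the contents of batch j.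
def pvSel {α : Type} : List α → Nat → Nat → Nat → List α
  | [], _, _, _ => []
  | x :: r, s, nn, j => (if s % nn = j then [x] else []) ++ pvSel r (s + 1) nn j

theorem pvModShift (nn s j : Nat) (hnn : 0 < nn) (hj : j < nn) :
    ((s + 1) % nn = j) ↔ (s % nn = (j + nn - 1) % nn) := by
  have hlt : s % nn < nn := Nat.mod_lt _ hnn
  have hj' : (j + nn - 1) % nn = if j = 0 then nn - 1 else j - 1 := by
    rcases j with _ | j'
    · simp [Nat.mod_eq_of_lt (show nn - 1 < nn by omega)]
    · have h : j' + 1 + nn - 1 = j' + nn := by omega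
      rw [h, Nat.add_mod_right, Nat.mod_eq_of_lt (by omega)]
      simp
  have hs1 : (s + 1) % nn = if s % nn + 1 = nn then 0 else s % nn + 1 := by
    rw [← Nat.mod_add_mod]
    split_ifs with h
    · rw [h, Nat.mod_self]
    · exact Nat.mod_eq_of_lt (by omega)
  rw [hs1, hj']
  split_ifs <;> omega

theorem pvSel_shift {α : Type} (nn : Nat) (hnn : 0 < nn) (j : Nat) (hj : j < nn) :
    ∀ (xs : List α) (s : Nat), pvSel xs (s + 1) nn j = pvSel xs s nn ((j + nn - 1) % nn) := by
  intro xs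
  induction xs with
  | nil => intro s; rfl
  | cons x r ih =>
      intro s
      show (if (s + 1) % nn = j then [x] else []) ++ pvSel r (s + 1 + 1) nn j
         = (if s % nn = (j + nn - 1) % nn then [x] else []) ++ pvSel r (s + 1) nn ((j + nn - 1) % nn)
      rw [ih (s + 1)]
      by_cases h : (s + 1) % nn = j
      · rw [if_pos h, if_pos ((pvModShift nn s j hnn hj).mp h)]
      · rw [if_neg h, if_neg (fun hh => h ((pvModShift nn s j hnn hj).mpr hh))]

-- A's fold, started from any accumulator of length nn, appends pvSel per batch.
theorem pvFoldA {α : Type} (nn : Nat) :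
    ∀ (qs : List α) (s : Nat) (acc : List (List α)), acc.length = nn →
      (PySem.List.enumerate qs (s : Int)).foldl
        (fun b p => b.modify (PySem.Int.mod p.1 (nn : Int)).toNat (fun batch => batch ++ [p.2])) acc
      = (List.range nn).map (fun j => acc.getD j [] ++ pvSel qs s nn j) := by
  intro qs
  induction qs with
  | nil =>
      intro s acc hlen
      rw [PySem.List.enumerate_nil]
      simp only [List.foldl_nil, pvSel, List.append_nil]
      apply List.ext_getElem
      · simp [hlen]
      · intro j h1 h2
        simp only [List.getElem_map, List.getElem_range]
        rw [List.getD_eq_getElem acc [] h1]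
  | cons x r ih =>
      intro s acc hlen
      rw [PySem.List.enumerate_cons, List.foldl_cons]
      have hs1 : ((s : Int) + 1) = ((s + 1 : Nat) : Int) := by push_cast; ring
      rw [hs1, ih (s + 1) _ (by rw [List.length_modify]; exact hlen)]
      apply List.map_congr_left
      intro j hj
      have hjn : j < nn := List.mem_range.mp hj
      have hjl : j < acc.length := by omega
      have hmod : (PySem.Int.mod ((s : Int)) ((nn : Int))).toNat = s % nn := by
        rw [PySem.Int.mod_natCast]; exact Int.toNat_natCast _
      have hml : j < (acc.modify (s % nn) (fun batch => batch ++ [x])).length := by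
        rw [List.length_modify]; omega
      simp only [hmod]
      rw [List.getD_eq_getElem _ [] hml, List.getD_eq_getElem acc [] hjl,
          List.getElem_modify]
      show _ = acc[j] ++ ((if s % nn = j then [x] else []) ++ pvSel r (s + 1) nn j)
      by_cases h : s % nn = j
      · rw [if_pos h, if_pos h]; simp
      · rw [if_neg h, if_neg h]; simp

-- the value of the strided slice, as a filterMap over indices j, j+nn, j+2nn, …
theorem pvSlice {α : Type} (xs : List α) (jn nn : Nat) (hnn : 0 < nn) :
    PySem.List.slice? xs (some (jn : Int)) none (nn : Int)
      = some ((List.range ((xs.length - jn + nn - 1) / nn)).filterMap (fun k => xs[jn + nn * k]?)) := by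
  have hpos : (0 : Int) < (nn : Int) := by exact_mod_cast hnn
  have hne : ((nn : Int)) ≠ 0 := ne_of_gt hpos
  have hn0 : ¬ ((nn : Int) < 0) := by omega
  have hj0 : ¬ ((jn : Int) < 0) := by omega
  simp only [PySem.List.slice?, PySem.List.sliceIndices, hne, hn0, hj0, if_false, hpos, if_true]
  by_cases hle : xs.length ≤ jn
  · have hmin : min (jn : Int) (xs.length : Int) = (xs.length : Int) :=
      min_eq_right (by exact_mod_cast hle)
    rw [hmin, if_neg (lt_irrefl _)]
    have hcnt : (xs.length - jn + nn - 1) / nn = 0 := Nat.div_eq_of_lt (by omega)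
    rw [hcnt]
    simp
  · rw [not_le] at hle
    have hmin : min (jn : Int) (xs.length : Int) = (jn : Int) :=
      min_eq_left (by exact_mod_cast hle.le)
    rw [hmin, if_pos (by exact_mod_cast hle)]
    congr 1
    have hcast : ((xs.length : Int) - jn + nn - 1) = ((xs.length - jn + nn - 1 : Nat) : Int) := by
      omega
    have hdiv : (((xs.length : Int) - jn + nn - 1) / (nn : Int)).toNat
        = (xs.length - jn + nn - 1) / nn := by
      rw [hcast, ← Int.natCast_ediv]
      exact Int.toNat_natCast _
    rw [hdiv]
    apply List.filterMap_congr
    intro k _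
    have hidx : ((jn : Int) + (nn : Int) * (k : Int)).toNat = jn + nn * k := by
      omega
    rw [hidx]

-- the filterMap over strided indices is batch jn, provided the range covers the whole list.
theorem pvStrided {α : Type} (nn : Nat) (hnn : 0 < nn) :
    ∀ (xs : List α) (jn cnt : Nat), jn < nn → xs.length ≤ jn + nn * cnt →
      (List.range cnt).filterMap (fun k => xs[jn + nn * k]?) = pvSel xs 0 nn jn := by
  intro xs
  induction xs with
  | nil => intro jn cnt _ _; simp [pvSel]
  | cons x r ih =>
      intro jn cnt hjn hb
      rcases jn with _ | j
      · -- jn = 0: head is picked, continue in r at phase nn-1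
        rcases cnt with _ | c
        · exfalso; simp at hb
        · rw [List.range_succ_eq_map, List.filterMap_cons, List.filterMap_map]
          have h0 : (x :: r)[0 + nn * 0]? = some x := by simp
          rw [h0]
          have hfun : ∀ k ∈ List.range c,
              ((fun k => (x :: r)[0 + nn * k]?) ∘ Nat.succ) k = r[(nn - 1) + nn * k]? := by
            intro k _
            show (x :: r)[0 + nn * (k + 1)]? = r[(nn - 1) + nn * k]?
            have h : 0 + nn * (k + 1) = ((nn - 1) + nn * k) + 1 := by
              rw [Nat.mul_succ]; omega
            rw [h, List.getElem?_cons_succ]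
          rw [List.filterMap_congr hfun]
          have hbr : r.length ≤ (nn - 1) + nn * c := by
            rw [Nat.mul_succ] at hb
            simp only [List.length_cons] at hb
            omega
          rw [ih (nn - 1) c (by omega) hbr]
          show _ = pvSel (x :: r) 0 nn 0
          simp only [pvSel, Nat.zero_mod, if_true]
          rw [pvSel_shift nn hnn 0 hnn r 0]
          have : (0 + nn - 1) % nn = nn - 1 := by
            rw [Nat.zero_add]
            exact Nat.mod_eq_of_lt (by omega)
          rw [this]
          rfl
      · -- jn = j + 1: head is skipped, continue in r at batch j
        have hfun : ∀ k ∈ List.range cnt,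
            (x :: r)[(j + 1) + nn * k]? = r[j + nn * k]? := by
          intro k _
          have h : (j + 1) + nn * k = (j + nn * k) + 1 := by omega
          rw [h, List.getElem?_cons_succ]
        rw [List.filterMap_congr hfun]
        have hbr : r.length ≤ j + nn * cnt := by
          simp only [List.length_cons] at hb; omega
        rw [ih j cnt (by omega) hbr]
        show _ = pvSel (x :: r) 0 nn (j + 1)
        have h0 : ¬ (0 % nn = j + 1) := by simp
        simp only [pvSel, h0, if_false, List.nil_append]
        rw [pvSel_shift nn hnn (j + 1) hjn r 0]
        have : (j + 1 + nn - 1) % nn = j := by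
          have h : j + 1 + nn - 1 = j + nn := by omega
          rw [h, Nat.add_mod_right, Nat.mod_eq_of_lt (by omega)]
        rw [this]

theorem pyRange_nil_of_nonpos (n : Int) (h : n ≤ 0) : PySem.List.pyRange 0 n 1 = [] := by
  simp [PySem.List.pyRange]; omega

-- ===== VERDICT (by name: the statement is the Claim_ definition above) =====
theorem distribute_queries_py_spec : Claim_equal_distribute_queries_py := by
  intro qs n _ hpre
  unfold Spec_distribute_queries_py distribute_queries_py distribute_queries_py_alt
  by_cases h0 : 0 < n
  · -- num_instances > 0
    obtain ⟨nn, rfl⟩ : ∃ nn : Nat, (nn : Int) = n := ⟨n.toNat, Int.toNat_of_nonneg (le_of_lt h0)⟩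
    have hnn : 0 < nn := by exact_mod_cast h0
    have hbat : (PySem.List.pyRange 0 ((nn : Nat) : Int) 1).map (fun _ => ([] : List (Int × String)))
        = List.replicate nn [] := by
      rw [PySem.List.pyRange_zero_natCast nn, List.map_map]
      rw [show ((fun (_ : Int) => ([] : List (Int × String))) ∘ fun (k : Nat) => ((k : Int)))
            = (fun _ => ([] : List (Int × String))) from rfl]
      rw [List.map_const', List.length_range]
    rw [hbat]
    rw [show (PySem.List.enumerate qs) = (PySem.List.enumerate qs ((0 : Nat) : Int)) from rfl]
    rw [pvFoldA nn qs 0 _ (List.length_replicate)]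
    rw [PySem.List.pyRange_zero_natCast nn, List.map_map]
    apply List.map_congr_left
    intro j hj
    have hjn : j < nn := List.mem_range.mp hj
    have hgd : (List.replicate nn ([] : List (Int × String))).getD j [] = [] := by simp
    rw [hgd, List.nil_append]
    show pvSel qs 0 nn j = (PySem.List.slice? qs (some ((j : Nat) : Int)) none ((nn : Nat) : Int)).getD []
    rw [pvSlice qs j nn hnn, Option.getD_some]
    set cnt := (qs.length - j + nn - 1) / nn with hcnt
    have hbound : qs.length ≤ j + nn * cnt := by
      by_cases hle : qs.length ≤ j
      · have : 0 ≤ nn * cnt := Nat.zero_le _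
        omega
      · rw [not_le] at hle
        have h1 := Nat.div_add_mod (qs.length - j + nn - 1) nn
        have h2 : (qs.length - j + nn - 1) % nn < nn := Nat.mod_lt _ hnn
        have h3 : qs.length - j ≤ nn * cnt := by rw [hcnt]; omega
        omega
    rw [pvStrided nn hnn qs j cnt hjn hbound]
  · -- num_instances ≤ 0: Pre_ forces the empty list; both sides are []
    have hq : qs = [] := by
      rcases hpre with h | h
      · exact absurd h h0
      · exact h
    subst hq
    rw [pyRange_nil_of_nonpos n (by omega)]
    simp [PySem.List.enumerate_nil]
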